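-- pv_equiv track=rewrite | github.com/axelsmagichammer/A112509 | src/algorithms/structured_search.py | _extract_seps
-- ===== SOURCE A (Python) =====
-- def _extract_seps(s: str) -> list[int]:
--     """Return separator (0-block) lengths between 1-blocks in a binary string."""
--     seps = []
--     i = 0
--     n = len(s)
--     while i < n:
--         if s[i] == '1':
--             while i < n and s[i] == '1':
--                 i += 1
--             if i < n and s[i] == '0':
--                 run = 0
--                 while i < n and s[i] == '0':
--                     run += 1
--                     i += 1
--                 seps.append(run)
--         else:
--             break
--     return seps
-- ===== SOURCE B (Python) =====
-- def _extract_seps(s: str) -> list[int]: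
--     """Return separator (0-block) lengths between 1-blocks in a binary string."""
--     # Phase 1: run-length encode s into (char, length) pairs.
--     runs = []
--     for ch in s:
--         if runs and runs[-1][0] == ch:
--             runs[-1] = (ch, runs[-1][1] + 1)
--         else:
--             runs.append((ch, 1))
--     # Phase 2: consume runs alternately, expecting a '1'-run then a '0'-run.
--     seps = []
--     expect_one = True
--     for ch, n in runs:
--         if expect_one:
--             if ch != '1':
--                 break
--         else:
--             if ch != '0':
--                 break
--             seps.append(n)
--         expect_one = not expect_one
--     return seps
-- ===== Notes on version B (the rewrite author's own statement) =====
-- stated objective: simpler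
-- what changed: Replaced the interleaved nested-while index scan with a two-phase decomposition: run-length encode the string into (char, length) runs, then consume the runs with an alternating expect-one flag, collecting the lengths of the zero runs.
import Mathlib
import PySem

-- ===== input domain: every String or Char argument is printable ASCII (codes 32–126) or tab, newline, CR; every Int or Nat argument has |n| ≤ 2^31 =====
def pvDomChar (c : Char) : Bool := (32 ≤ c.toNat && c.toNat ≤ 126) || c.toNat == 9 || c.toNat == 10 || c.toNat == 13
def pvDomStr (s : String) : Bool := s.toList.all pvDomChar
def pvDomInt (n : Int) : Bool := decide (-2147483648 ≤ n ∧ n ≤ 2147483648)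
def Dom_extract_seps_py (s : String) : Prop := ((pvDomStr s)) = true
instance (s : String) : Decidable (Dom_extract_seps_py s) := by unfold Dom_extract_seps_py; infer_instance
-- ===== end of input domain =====

-- B replaces A's interleaved nested-while index scan with a two-phase decomposition
-- (run-length encode, then consume runs with an alternating flag); objective: simpler. Same cost.

-- ===== PORT A =====
-- inner `while i < n and s[i] == '1': i += 1`
def aSkipOnes : List Char → List Char
  | [] => []
  | c :: cs => if c = '1' then aSkipOnes cs else c :: cs

-- inner `while i < n and s[i] == '0': run += 1; i += 1`
def aCountZeros : List Char → Int → Int × List Char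
  | [], run => (run, [])
  | c :: cs, run => if c = '0' then aCountZeros cs (run + 1) else (run, c :: cs)

theorem aSkipOnes_length : ∀ cs : List Char, (aSkipOnes cs).length ≤ cs.length := by
  intro cs
  induction cs with
  | nil => simp [aSkipOnes]
  | cons c cs ih =>
    simp only [aSkipOnes]
    split
    · exact Nat.le_succ_of_le ih
    · simp

theorem aCountZeros_length : ∀ (cs : List Char) (r : Int), (aCountZeros cs r).2.length ≤ cs.length := by
  intro cs
  induction cs with
  | nil => intro r; simp [aCountZeros]
  | cons c cs ih =>
    intro r
    simp only [aCountZeros]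
    split
    · exact Nat.le_succ_of_le (ih _)
    · simp

-- outer `while i < n: if s[i] == '1': … else: break`
def aOuter (cs : List Char) (seps : List Int) : List Int :=
  match cs with
  | [] => seps
  | c :: cs' =>
    if c = '1' then
      let rest := aSkipOnes (c :: cs')
      match hr : rest with
      | [] => seps
      | c2 :: cs2 =>
        if c2 = '0' then
          let pr := aCountZeros (c2 :: cs2) 0
          aOuter pr.2 (seps ++ [pr.1])
        else seps
    else seps
  termination_by cs.length
  decreasing_by
    have h1 : (aSkipOnes (c :: cs')).length ≤ cs'.length := by
      simp only [aSkipOnes, if_pos ‹c = '1'›]; exact aSkipOnes_length cs'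
    have h2 : (aCountZeros (c2 :: cs2) 0).2.length ≤ cs2.length + 1 := aCountZeros_length _ _
    have h3 : (c2 :: cs2).length ≤ cs'.length := by rw [← hr]; exact h1
    simp only [List.length_cons] at *
    omega

def extract_seps_py (s : String) : List Int := aOuter s.toList []

-- ===== PORT B =====
-- phase 1: run-length encode (forward loop appending/extending the last run;
-- the accumulator is kept reversed, head = Python's runs[-1], reversed at the end)
def bStep (runs : List (Char × Int)) (ch : Char) : List (Char × Int) :=
  match runs with
  | (c, n) :: rest => if c = ch then (c, n + 1) :: rest else (ch, 1) :: (c, n) :: rest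
  | [] => [(ch, 1)]

def bRuns (cs : List Char) : List (Char × Int) := (cs.foldl bStep []).reverse

-- phase 2: consume runs alternately expecting '1' then '0'
def bConsume : List (Char × Int) → Bool → List Int → List Int
  | [], _, seps => seps
  | (c, n) :: rest, expectOne, seps =>
    if expectOne then
      if c ≠ '1' then seps else bConsume rest false seps
    else
      if c ≠ '0' then seps else bConsume rest true (seps ++ [n])

def extract_seps_py_alt (s : String) : List Int := bConsume (bRuns s.toList) true []

-- ===== PRECONDITION & SPEC =====
def Spec_extract_seps_py (s : String) (out : List Int) : Prop := out = extract_seps_py_alt s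
instance (s : String) (out : List Int) : Decidable (Spec_extract_seps_py s out) := by unfold Spec_extract_seps_py; infer_instance

-- ===== CLAIM (what is proved, stated in full; the proofs are below) =====
def Claim_equal_extract_seps_py : Prop := ∀ (s : String), Dom_extract_seps_py s → Spec_extract_seps_py s (extract_seps_py s)

-- ===== LEMMAS AND PROOFS =====

-- maximal runs, defined by span recursion (proof-side characterisation of bRuns)
def spanRuns : List Char → List (Char × Int)
  | [] => []
  | c :: cs =>
      (c, 1 + ((cs.takeWhile (· == c)).length : Int)) :: spanRuns (cs.dropWhile (· == c))
  termination_by cs => cs.length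
  decreasing_by
    have := List.length_dropWhile_le (p := (· == c)) (l := cs)
    simp only [List.length_cons]; omega

theorem bStep_ne_nil : ∀ (acc : List (Char × Int)) (ch : Char), bStep acc ch ≠ [] := by
  intro acc ch
  rcases acc with _ | ⟨⟨c, n⟩, rest⟩
  · simp [bStep]
  · simp only [bStep]; split <;> simp

theorem bStep_tail : ∀ (ch : Char) (x : Char × Int) (acc : List (Char × Int)),
    bStep (x :: acc) ch = bStep [x] ch ++ acc := by
  intro ch ⟨c, n⟩ acc
  simp only [bStep]
  split <;> simp

theorem foldl_bStep_tail : ∀ (cs : List Char) (x : Char × Int) (acc : List (Char × Int)),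
    cs.foldl bStep (x :: acc) = cs.foldl bStep [x] ++ acc := by
  intro cs
  induction cs with
  | nil => intro x acc; simp
  | cons ch cs ih =>
    intro x acc
    simp only [List.foldl_cons]
    rw [bStep_tail]
    rcases h : bStep [x] ch with _ | ⟨y, ys⟩
    · exact absurd h (bStep_ne_nil _ _)
    · rw [List.cons_append, ih y (ys ++ acc), ih y ys, List.append_assoc]

theorem foldl_bStep_run : ∀ (cs : List Char) (c : Char) (n : Int),
    cs.foldl bStep [(c, n)] =
      (cs.dropWhile (· == c)).foldl bStep [] ++ [(c, n + ((cs.takeWhile (· == c)).length : Int))] := by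
  intro cs
  induction cs with
  | nil => intro c n; simp
  | cons ch cs ih =>
    intro c n
    by_cases h : ch = c
    · subst h
      simp only [List.foldl_cons, bStep, List.takeWhile_cons, List.dropWhile_cons, BEq.rfl,
        if_pos]
      rw [ih ch (n + 1)]
      simp only [List.length_cons]
      congr 2
      push_cast
      ring
    · have h' : ¬ c = ch := fun e => h e.symm
      have hb : (ch == c) = false := by simp [h]
      simp only [List.foldl_cons, bStep, if_neg h', List.takeWhile_cons, List.dropWhile_cons, hb,
        Bool.false_eq_true, if_false, List.length_nil]
      rw [foldl_bStep_tail cs (ch, 1) [(c, n)]]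
      simp

theorem bRuns_eq_spanRuns : ∀ cs : List Char, bRuns cs = spanRuns cs := by
  intro cs
  induction hn : cs.length using Nat.strong_induction_on generalizing cs with
  | _ n ih =>
    cases cs with
    | nil => simp [bRuns, spanRuns]
    | cons c cs' =>
      unfold bRuns spanRuns
      simp only [List.foldl_cons, bStep]
      rw [foldl_bStep_run]
      rw [List.reverse_append]
      simp only [List.reverse_cons, List.reverse_nil, List.nil_append, List.cons_append,
        List.nil_append]
      have hlt : (cs'.dropWhile (· == c)).length < n := by
        have := List.length_dropWhile_le (p := (· == c)) (l := cs')
        subst hn; simp only [List.length_cons]; omega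
      have htail := ih _ hlt (cs'.dropWhile (· == c)) rfl
      unfold bRuns at htail
      rw [htail]

theorem aSkipOnes_eq : ∀ cs : List Char, aSkipOnes cs = cs.dropWhile (· == '1') := by
  intro cs
  induction cs with
  | nil => rfl
  | cons c cs ih =>
    simp only [aSkipOnes, List.dropWhile_cons]
    by_cases h : c = '1' <;> simp [h, ih]

theorem aCountZeros_eq : ∀ (cs : List Char) (r : Int),
    aCountZeros cs r = (r + ((cs.takeWhile (· == '0')).length : Int), cs.dropWhile (· == '0')) := by
  intro cs
  induction cs with
  | nil => intro r; simp [aCountZeros]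
  | cons c cs ih =>
    intro r
    simp only [aCountZeros, List.takeWhile_cons, List.dropWhile_cons]
    by_cases h : c = '0'
    · simp only [h, BEq.rfl, if_pos, ih (r + 1), List.length_cons, Prod.mk.injEq]
      refine ⟨by push_cast; ring, by simp⟩
    · have hb : (c == '0') = false := by simp [h]
      simp [hb, h]

theorem aOuter_eq_bConsume : ∀ (cs : List Char) (seps : List Int),
    aOuter cs seps = bConsume (spanRuns cs) true seps := by
  intro cs
  induction hn : cs.length using Nat.strong_induction_on generalizing cs with
  | _ n ih =>
    intro seps
    cases cs with
    | nil => simp [aOuter, spanRuns, bConsume]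
    | cons c cs' =>
      by_cases hc : c = '1'
      · subst hc
        unfold aOuter spanRuns
        have hskip : aSkipOnes ('1' :: cs') = cs'.dropWhile (· == '1') := by
          simp only [aSkipOnes]; exact aSkipOnes_eq cs'
        simp only [bConsume, ne_eq, not_true_eq_false, if_false, if_pos]
        rcases hr : aSkipOnes ('1' :: cs') with _ | ⟨c2, cs2⟩
        · have : cs'.dropWhile (· == '1') = [] := by rw [← hskip, hr]
          simp [this, spanRuns, bConsume]
        · have hd : cs'.dropWhile (· == '1') = c2 :: cs2 := by rw [← hskip, hr]
          rw [hd]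
          unfold spanRuns
          by_cases h0 : c2 = '0'
          · subst h0
            simp only [bConsume, ne_eq, not_true_eq_false, if_false, if_pos]
            rw [aCountZeros_eq]
            simp only [Int.zero_add]
            have hlt : (cs2.dropWhile (· == '0')).length < n := by
              have h1 : (aSkipOnes ('1' :: cs')).length ≤ cs'.length := by
                simp only [aSkipOnes]; exact aSkipOnes_length cs'
              rw [hr] at h1
              have h2 := List.length_dropWhile_le (p := (· == '0')) (l := cs2)
              subst hn
              simp only [List.length_cons] at *
              omega
            simp only [List.dropWhile_cons, List.takeWhile_cons, BEq.rfl, if_pos,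
              Bool.false_eq_true, if_false, List.length_cons, Nat.cast_add, Nat.cast_one]
            rw [add_comm (((cs2.takeWhile (· == '0')).length : Int)) 1]
            exact ih _ hlt _ rfl _
          · simp [bConsume, h0]
      · unfold aOuter spanRuns
        simp [bConsume, hc]

-- ===== VERDICT (by name: the statement is the Claim_ definition above) =====
theorem extract_seps_py_spec : Claim_equal_extract_seps_py := by
  intro s _
  unfold Spec_extract_seps_py extract_seps_py extract_seps_py_alt
  rw [bRuns_eq_spanRuns]
  exact aOuter_eq_bConsume s.toList []
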